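-- pv_equiv track=rewrite | github.com/jiminkyung/Algorithm | Programmers/Lv2/더 맵게.py | solution
-- ===== SOURCE A (Python) =====
-- def solution(scoville, K):
--     ret = 0
--     while not all(s >= K for s in scoville):
--         if len(scoville) < 2:
--             return -1
--
--         scoville.sort()
--         ret += 1
--         m1 = scoville.pop(0)
--         m2 = scoville.pop(0)
--         m = m1 + m2 * 2
--         scoville.insert(0, m)
--     return ret
-- ===== SOURCE B (Python) =====
-- def solution(scoville, K):
--     # Sort once, then keep the working list sorted: pop the two smallest from the
--     # front and place the combined value at its position found by binary search,
--     # instead of re-sorting the whole list every round.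
--     # (Works on a sorted copy; does not mutate the input list, unlike the original.)
--     h = sorted(scoville)
--     ret = 0
--     while h and h[0] < K:
--         if len(h) < 2:
--             return -1
--         m = h[0] + 2 * h[1]
--         del h[:2]
--         lo, hi = 0, len(h)
--         while lo < hi:
--             mid = (lo + hi) // 2
--             if h[mid] < m:
--                 lo = mid + 1
--             else:
--                 hi = mid
--         h.insert(lo, m)
--         ret += 1
--     return ret
-- ===== Notes on version B (the rewrite author's own statement) =====
-- stated objective: faster
-- what changed: B sorts the list once and then maintains the sorted order itself: it pops the two smallest from the front and places each combined value at the position found by a hand-written binary search, instead of A's re-sorting the whole list on every loop iteration (B works on a copy; it does not mutate the caller's list).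
import Mathlib
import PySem

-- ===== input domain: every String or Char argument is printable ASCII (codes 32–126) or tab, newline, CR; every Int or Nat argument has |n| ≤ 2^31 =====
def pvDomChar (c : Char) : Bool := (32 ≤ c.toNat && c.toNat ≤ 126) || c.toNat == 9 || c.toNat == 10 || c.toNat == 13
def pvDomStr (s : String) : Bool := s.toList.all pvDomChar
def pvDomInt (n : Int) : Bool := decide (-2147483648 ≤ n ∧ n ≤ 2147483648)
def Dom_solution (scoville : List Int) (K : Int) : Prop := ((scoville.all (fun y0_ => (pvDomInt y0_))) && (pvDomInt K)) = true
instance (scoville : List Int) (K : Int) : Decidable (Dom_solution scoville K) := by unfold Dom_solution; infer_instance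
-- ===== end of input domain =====

-- B sorts once and keeps the working list sorted by positional insertion instead of
-- re-sorting every round (A also mutates its argument; equivalence is about the return value).

-- ===== PORT A =====
-- the while loop of A: condition check, length guard, sort, pop two, combine, re-insert at front
def solution_loopA (sc : List Int) (K : Int) (ret : Int) : Int :=
  if sc.all (fun s => K ≤ s) then ret
  else if sc.length < 2 then -1
  else
    match hs : PySem.List.sorted sc (fun x => x) false with
    | m1 :: m2 :: rest => solution_loopA ((m1 + m2 * 2) :: rest) K (ret + 1)
    | _ => -1   -- unreachable: the sorted list has sc.length ≥ 2 elements
termination_by sc.length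
decreasing_by
  have h := PySem.List.length_sorted (xs := sc) (key := fun x : Int => x) (rev := false)
  rw [hs] at h
  simp at h ⊢
  omega

def solution (scoville : List Int) (K : Int) : Int :=
  solution_loopA scoville K 0

-- ===== PORT B =====
-- the inner binary-search loop of Source B: lo/hi narrowing on the sorted list
-- (h[mid] is always in range here, so List.getD with default 0 is exact)
def solution_bisect (rest : List Int) (m : Int) (lo hi : Nat) : Nat :=
  if lo < hi then
    let mid := (lo + hi) / 2
    if rest.getD mid 0 < m then solution_bisect rest m (mid + 1) hi
    else solution_bisect rest m lo mid
  else lo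
termination_by hi - lo
decreasing_by all_goals omega

-- the outer while loop of Source B over the sorted working list h
def solution_loopB (h : List Int) (K : Int) (ret : Int) : Int :=
  match h with
  | [] => ret
  | x :: t =>
    if K ≤ x then ret
    else
      match t with
      | [] => -1
      | y :: rest =>
        solution_loopB (PySem.List.insert rest ((solution_bisect rest (x + 2 * y) 0 rest.length : Nat) : Int) (x + 2 * y)) K (ret + 1)
termination_by h.length
decreasing_by
  simp [PySem.List.length_insert]

def solution_alt (scoville : List Int) (K : Int) : Int :=
  solution_loopB (PySem.List.sorted scoville (fun x => x) false) K 0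

-- ===== PRECONDITION & SPEC =====
def Spec_solution (scoville : List Int) (K : Int) (out : Int) : Prop := out = solution_alt scoville K
instance (scoville : List Int) (K : Int) (out : Int) : Decidable (Spec_solution scoville K out) := by unfold Spec_solution; infer_instance

-- ===== CLAIM (what is proved, stated in full; the proofs are below) =====
def Claim_equal_solution : Prop := ∀ (scoville : List Int) (K : Int), Dom_solution scoville K → Spec_solution scoville K (solution scoville K)

-- ===== LEMMAS AND PROOFS =====

theorem getD_lt_iff (m : Int) : ∀ (rest : List Int), rest.Pairwise (· ≤ ·) →
    ∀ i, i < rest.length →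
    (rest.getD i 0 < m ↔ i < (rest.takeWhile (fun y => decide (y < m))).length) := by
  intro rest
  induction rest with
  | nil => intro _ i hi; simp at hi
  | cons y t ih =>
    intro hpw i hi
    rcases List.pairwise_cons.mp hpw with ⟨hy, ht⟩
    by_cases h : y < m
    · cases i with
      | zero => simpa [h]
      | succ j =>
        simp only [List.getD_cons_succ, List.takeWhile_cons, h, decide_true, if_pos,
          List.length_cons]
        rw [ih ht j (by simpa using hi)]
        omega
    · cases i with
      | zero => simpa [h]
      | succ j =>
        have hjt : j < t.length := by simpa using hi
        have hmem : t.getD j 0 ∈ t := by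
          rw [List.getD_eq_getElem _ _ hjt]; exact List.getElem_mem hjt
        have hge : m ≤ t.getD j 0 := le_trans (not_lt.mp h) (hy _ hmem)
        simp only [List.getD_cons_succ, List.takeWhile_cons, h, decide_false,
          Bool.false_eq_true, if_false, List.length_nil]
        constructor
        · intro hlt; omega
        · intro hcon; omega

theorem bisect_eq (rest : List Int) (m : Int) (hpw : rest.Pairwise (· ≤ ·)) :
    ∀ (k lo hi : Nat), hi - lo ≤ k →
      lo ≤ (rest.takeWhile (fun y => decide (y < m))).length →
      (rest.takeWhile (fun y => decide (y < m))).length ≤ hi →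
      hi ≤ rest.length →
      solution_bisect rest m lo hi = (rest.takeWhile (fun y => decide (y < m))).length := by
  intro k
  induction k with
  | zero =>
    intro lo hi hk hlo hhi _
    rw [solution_bisect]
    have : ¬ lo < hi := by omega
    rw [if_neg this]
    omega
  | succ k ih =>
    intro lo hi hk hlo hhi hlen
    rw [solution_bisect]
    by_cases hlt : lo < hi
    · rw [if_pos hlt]
      have hmid : (lo + hi) / 2 < rest.length := by omega
      by_cases hval : rest.getD ((lo + hi) / 2) 0 < m
      · rw [if_pos hval]
        have := (getD_lt_iff m rest hpw _ hmid).mp hval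
        exact ih _ _ (by omega) (by omega) hhi hlen
      · rw [if_neg hval]
        have := mt (getD_lt_iff m rest hpw _ hmid).mpr hval
        exact ih _ _ (by omega) hlo (by omega) (by omega)
    · rw [if_neg hlt]; omega

theorem take_length_takeWhile' (p : Int → Bool) : ∀ (l : List Int),
    l.take (l.takeWhile p).length = l.takeWhile p := by
  intro l
  induction l with
  | nil => simp
  | cons y t ih =>
    by_cases h : p y
    · simp [List.takeWhile_cons, h, ih]
    · simp [List.takeWhile_cons, h]

theorem drop_length_takeWhile' (p : Int → Bool) : ∀ (l : List Int),
    l.drop (l.takeWhile p).length = l.dropWhile p := by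
  intro l
  induction l with
  | nil => simp
  | cons y t ih =>
    by_cases h : p y
    · simp [List.takeWhile_cons, List.dropWhile_cons, h, ih]
    · simp [List.takeWhile_cons, List.dropWhile_cons, h]

theorem insert_eq_take_drop (rest : List Int) (m : Int) (hpw : rest.Pairwise (· ≤ ·)) :
    PySem.List.insert rest ((solution_bisect rest m 0 rest.length : Nat) : Int) m
      = rest.takeWhile (fun y => decide (y < m)) ++ m :: rest.dropWhile (fun y => decide (y < m)) := by
  have hT : (rest.takeWhile (fun y => decide (y < m))).length ≤ rest.length :=
    (List.takeWhile_sublist _).length_le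
  rw [bisect_eq rest m hpw rest.length 0 rest.length (by omega) (by omega) hT le_rfl]
  rw [PySem.List.insert_natCast _ _ _ hT]
  rw [take_length_takeWhile', drop_length_takeWhile']

theorem insSorted_perm (rest : List Int) (m : Int) :
    (rest.takeWhile (fun y => decide (y < m)) ++ m :: rest.dropWhile (fun y => decide (y < m))).Perm (m :: rest) := by
  have h := List.perm_middle (a := m) (l₁ := rest.takeWhile (fun y => decide (y < m)))
    (l₂ := rest.dropWhile (fun y => decide (y < m)))
  rwa [List.takeWhile_append_dropWhile] at h

theorem insSorted_pairwise (rest : List Int) (m : Int) (h : rest.Pairwise (· ≤ ·)) :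
    (rest.takeWhile (fun y => decide (y < m)) ++ m :: rest.dropWhile (fun y => decide (y < m))).Pairwise (· ≤ ·) := by
  induction rest with
  | nil => simp
  | cons y t ih =>
    rcases List.pairwise_cons.mp h with ⟨hy, ht⟩
    by_cases hm : y < m
    · simp only [List.takeWhile_cons, hm, decide_true, List.dropWhile_cons, List.cons_append,
        if_true, if_pos]
      refine List.pairwise_cons.mpr ⟨?_, ih ht⟩
      intro z hz
      rcases List.mem_append.mp hz with hz | hz
      · exact hy z ((List.takeWhile_sublist _).mem hz)
      · rcases List.mem_cons.mp hz with rfl | hz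
        · exact le_of_lt hm
        · exact hy z ((List.dropWhile_sublist _).mem hz)
    · simp only [List.takeWhile_cons, hm, decide_false, List.dropWhile_cons, List.nil_append,
        if_false, Bool.false_eq_true]
      refine List.pairwise_cons.mpr ⟨?_, h⟩
      intro z hz
      rcases List.mem_cons.mp hz with rfl | hz
      · exact not_lt.mp hm
      · exact le_trans (not_lt.mp hm) (hy z hz)

theorem loopA_eq_loopB (n : Nat) : ∀ (sc : List Int) (K ret : Int), sc.length ≤ n →
    solution_loopA sc K ret = solution_loopB (PySem.List.sorted sc (fun x => x) false) K ret := by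
  induction n with
  | zero =>
    intro sc K ret h
    have : sc = [] := List.length_eq_zero_iff.mp (Nat.le_zero.mp h)
    subst this
    rw [solution_loopA]
    simp [PySem.List.sorted, solution_loopB]
  | succ n ih =>
    intro sc K ret hlen
    rw [solution_loopA]
    have hlensort := PySem.List.length_sorted (xs := sc) (key := fun x : Int => x) (rev := false)
    by_cases hall : sc.all (fun s => decide (K ≤ s)) = true
    · rw [if_pos hall]
      cases hs : PySem.List.sorted sc (fun x => x) false with
      | nil => rw [solution_loopB]
      | cons x t =>
        have hx : K ≤ x := by
          have hmem : x ∈ sc := (PySem.List.sorted_perm (xs := sc) (key := fun x : Int => x) (rev := false)).mem_iff.mp (by rw [hs]; exact List.mem_cons_self)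
          simpa using List.all_eq_true.mp hall x hmem
        rw [solution_loopB.eq_def]
        simp [hx]
    · rw [if_neg hall]
      obtain ⟨s, hsmem, hsK⟩ : ∃ s ∈ sc, ¬ K ≤ s := by
        by_contra hc
        push_neg at hc
        exact hall (List.all_eq_true.mpr (fun x hx => decide_eq_true (hc x hx)))
      cases hs : PySem.List.sorted sc (fun x => x) false with
      | nil =>
        rw [hs] at hlensort
        have : sc = [] := List.length_eq_zero_iff.mp (by simp at hlensort; omega)
        subst this
        simp at hsmem
      | cons x t =>
        have hxK : ¬ K ≤ x := by
          have := PySem.List.key_head_sorted_le (xs := sc) (key := fun x : Int => x) hs s hsmem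
          simp only [] at this
          omega
        have hpw : (x :: t).Pairwise (fun a b : Int => a ≤ b) := by
          have := PySem.List.sorted_pairwise (xs := sc) (key := fun x : Int => x)
          rwa [hs] at this
        cases t with
        | nil =>
          have h1 : sc.length < 2 := by rw [hs] at hlensort; simp at hlensort; omega
          rw [if_pos h1, solution_loopB.eq_def]
          simp [hxK]
        | cons y rest =>
          have h2 : ¬ sc.length < 2 := by rw [hs] at hlensort; simp at hlensort; omega
          rw [if_neg h2]
          split
          · rename_i m1 m2 rest2 heq
            injection heq with e1 e2
            injection e2 with e2 e3
            subst e1 e2 e3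
            conv_rhs => rw [solution_loopB.eq_def]
            simp only [if_neg hxK]
            have hrec : ((x + y * 2) :: rest).length ≤ n := by
              rw [hs] at hlensort; simp at hlensort ⊢; omega
            rw [ih _ K (ret + 1) hrec]
            congr 1
            have hpwr : rest.Pairwise (fun a b : Int => a ≤ b) :=
              List.Pairwise.sublist (List.sublist_cons_self _ _) (List.Pairwise.sublist (List.sublist_cons_self _ _) hpw)
            rw [insert_eq_take_drop rest _ hpwr]
            have hrw : x + y * 2 = x + 2 * y := by ring
            rw [hrw]
            refine PySem.List.sorted_id_eq_of_perm_of_pairwise _ _ ?_ ?_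
            · exact insSorted_perm rest (x + 2 * y)
            · exact insSorted_pairwise rest (x + 2 * y) hpwr
          · rename_i hfa
            exact absurd rfl (hfa x y rest)

-- ===== VERDICT (by name: the statement is the Claim_ definition above) =====
theorem solution_spec : Claim_equal_solution := by
  intro scoville K _
  unfold Spec_solution solution solution_alt
  exact loopA_eq_loopB scoville.length scoville K 0 le_rfl
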